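-- pv_equiv track=rewrite | github.com/thatyang/ctci | 1_3_permutaton.py | decidePermutation2
-- ===== SOURCE A (Python) =====
-- def decidePermutation2(astr, bstr):
--
--     match = True
--
--     if len(astr) != len(bstr):
--         return False
--     else:
--         alist = list(astr)
--         blist = list(bstr)
--
--         alist.sort()
--         blist.sort()
--
--         index = 0
--
--         while match and index < len(alist) - 1:
--             if alist[index] != blist[index]:
--                 match = False
--             index += 1
--
--     return match
-- ===== SOURCE B (Python) =====
-- def decidePermutation2(astr, bstr):
--     if len(astr) != len(bstr):
--         return False
--     counts = {}
--     for c in astr: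
--         counts[c] = counts.get(c, 0) + 1
--     for c in bstr:
--         if counts.get(c, 0) == 0:
--             return False
--         counts[c] -= 1
--     return True
-- ===== Notes on version B (the rewrite author's own statement) =====
-- stated objective: alternative
-- what changed: Replaces sort-both-strings-then-scan with a single character-count dictionary built from astr and drained by bstr, so no sorting and no positional compare happen (O(n) counting instead of O(n log n) sorting; not measurably faster here).
-- intended difference: On equal-length non-permutation strings that become equal as multisets after removing one occurrence of each string's largest character (e.g. 'ab' vs 'ac'), A returns True because its scan stops one position short of the last sorted index, while B returns False, the correct answer to the permutation question. — e.g. on decidePermutation2("ab", "ac"): A returns true, B returns false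
import Mathlib
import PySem

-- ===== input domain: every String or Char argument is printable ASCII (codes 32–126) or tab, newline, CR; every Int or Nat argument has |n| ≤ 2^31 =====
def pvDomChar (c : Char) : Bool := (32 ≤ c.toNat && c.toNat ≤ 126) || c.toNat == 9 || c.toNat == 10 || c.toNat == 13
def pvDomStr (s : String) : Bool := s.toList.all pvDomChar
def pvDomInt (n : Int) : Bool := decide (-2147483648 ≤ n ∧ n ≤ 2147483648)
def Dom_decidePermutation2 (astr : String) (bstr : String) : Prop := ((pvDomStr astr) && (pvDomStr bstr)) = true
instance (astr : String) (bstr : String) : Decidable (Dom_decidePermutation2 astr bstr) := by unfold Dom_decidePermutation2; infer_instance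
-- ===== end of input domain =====

-- B replaces A's sort-both-strings-then-scan with a single character-count dictionary built
-- from astr and drained by bstr (no sorting); A's scan stops one sorted position short of the
-- end, which B does not reproduce — that intended difference is stated as D_ below.

-- ===== PORT A =====
-- the while loop `while match and index < len(alist) - 1: …`
-- (index stays in range 0 ≤ index < len(alist), so alist[index] is List.getElem? on an
-- in-range index — exact)
-- (fuel = alist.length only makes the recursion structural: the guard index < len - 1
-- fails before the fuel can run out, so the loop is exactly Python's)
def pvALoop (alist blist : List Char) (mtch : Bool) (index : Nat) : Nat → Bool
  | 0 => mtch
  | fuel + 1 =>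
    if mtch && decide (index < alist.length - 1) then
      pvALoop alist blist (if alist[index]? ≠ blist[index]? then false else mtch) (index + 1) fuel
    else mtch

def decidePermutation2 (astr : String) (bstr : String) : Bool :=
  if PySem.Str.len astr ≠ PySem.Str.len bstr then false
  else
    let alist := PySem.List.sorted astr.toList (fun c => c) false
    let blist := PySem.List.sorted bstr.toList (fun c => c) false
    pvALoop alist blist true 0 alist.length

-- ===== PORT B =====
-- the `for c in bstr:` loop with its early `return False`; `counts[c] -= 1` runs only when
-- `counts.get(c, 0) != 0`, i.e. when the key is present, so it is `insert c (getD c 0 - 1)` — exact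
def pvBLoop (d : PySem.Dict Char Int) : List Char → Bool
  | [] => true
  | c :: rest =>
      if d.getD c 0 == 0 then false
      else pvBLoop (d.insert c (d.getD c 0 - 1)) rest

def decidePermutation2_alt (astr : String) (bstr : String) : Bool :=
  if PySem.Str.len astr ≠ PySem.Str.len bstr then false
  else
    let counts := astr.toList.foldl (fun d c => d.insert c (d.getD c 0 + 1))
      (PySem.Dict.empty : PySem.Dict Char Int)
    pvBLoop counts bstr.toList

-- ===== PRECONDITION & SPEC =====
-- On equal-length non-permutation strings whose multisets become equal after removing one
-- occurrence of each string's largest character, A returns True (its scan skips the last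
-- sorted position) while B returns False, the correct answer to the permutation question.
def D_decidePermutation2 (astr : String) (bstr : String) : Prop :=
  astr.toList.length = bstr.toList.length ∧ astr.toList ≠ [] ∧
  astr.toList.max? ≠ bstr.toList.max? ∧
  ∀ c ∈ astr.toList ++ bstr.toList,
    (astr.toList.erase ((astr.toList.max?).getD 'a')).count c
      = (bstr.toList.erase ((bstr.toList.max?).getD 'a')).count c
instance (astr : String) (bstr : String) : Decidable (D_decidePermutation2 astr bstr) := by
  unfold D_decidePermutation2; infer_instance

def Spec_decidePermutation2 (astr : String) (bstr : String) (out : Bool) : Prop := ¬ D_decidePermutation2 astr bstr → out = decidePermutation2_alt astr bstr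
instance (astr : String) (bstr : String) (out : Bool) : Decidable (Spec_decidePermutation2 astr bstr out) := by unfold Spec_decidePermutation2; infer_instance

def pvDiffWitness_decidePermutation2 : String × String := ("ab", "ac")
def pvDiffWitnessOut_decidePermutation2 : Bool × Bool := (true, false)

-- ===== CLAIM (what is proved, stated in full; the proofs are below) =====
def Claim_unchanged_decidePermutation2 : Prop := ∀ (astr : String) (bstr : String), Dom_decidePermutation2 astr bstr → Spec_decidePermutation2 astr bstr (decidePermutation2 astr bstr)
def Claim_changed_decidePermutation2 : Prop := Dom_decidePermutation2 (pvDiffWitness_decidePermutation2.1) (pvDiffWitness_decidePermutation2.2) ∧ D_decidePermutation2 (pvDiffWitness_decidePermutation2.1) (pvDiffWitness_decidePermutation2.2) ∧ decidePermutation2 (pvDiffWitness_decidePermutation2.1) (pvDiffWitness_decidePermutation2.2) = pvDiffWitnessOut_decidePermutation2.1 ∧ decidePermutation2_alt (pvDiffWitness_decidePermutation2.1) (pvDiffWitness_decidePermutation2.2) = pvDiffWitnessOut_decidePermutation2.2 ∧ pvDiffWitnessOut_decidePermutation2.1 ≠ pvDiffWitnessOut_decidePermutation2.2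
def Claim_exact_decidePermutation2 : Prop := ∀ (astr : String) (bstr : String), Dom_decidePermutation2 astr bstr → D_decidePermutation2 astr bstr → decidePermutation2 astr bstr ≠ decidePermutation2_alt astr bstr

-- ===== LEMMAS AND PROOFS =====

-- A's loop never recovers from a False flag
theorem pvALoop_false (alist blist : List Char) (fuel : Nat) (i : Nat) :
    pvALoop alist blist false i fuel = false := by
  cases fuel <;> simp [pvALoop]

-- characterisation of A's loop: started True at i, it returns True iff every compared
-- position (j with i ≤ j and j < len - 1) matches
theorem pvALoop_true_iff (alist blist : List Char) (fuel : Nat) (i : Nat)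
    (hf : alist.length ≤ i + fuel + 1) :
    pvALoop alist blist true i fuel = true ↔
      ∀ j, i ≤ j → j + 1 < alist.length → alist[j]? = blist[j]? := by
  induction fuel generalizing i with
  | zero =>
    simp only [pvALoop, true_iff]
    intro j hij hj
    omega
  | succ fuel ih =>
    rw [pvALoop]
    by_cases h : i < alist.length - 1
    · rw [if_pos (by simp [h])]
      by_cases he : alist[i]? = blist[i]?
      · rw [if_neg (by simp [he])]
        rw [ih (i + 1) (by omega)]
        constructor
        · intro hall j hij hj
          rcases Nat.eq_or_lt_of_le hij with rfl | hlt
          · exact he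
          · exact hall j hlt hj
        · intro hall j hij hj
          exact hall j (Nat.le_of_succ_le hij) hj
      · rw [if_pos (by simp [he]), pvALoop_false]
        simp only [Bool.false_eq_true, false_iff]
        intro hall
        exact he (hall i le_rfl (by omega))
    · rw [if_neg (by simp [h])]
      constructor
      · intro _ j hij hj
        exact absurd hj (by omega)
      · intro _; rfl

-- dropLast equality, positionwise (for equal-length lists)
theorem dropLast_eq_iff (l m : List Char) (h : l.length = m.length) :
    l.dropLast = m.dropLast ↔ ∀ j, j + 1 < l.length → l[j]? = m[j]? := by
  have hget : ∀ (t : List Char) (j : Nat), j + 1 < t.length → t.dropLast[j]? = t[j]? := by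
    intro t j hj
    rw [List.getElem?_eq_getElem (by simp [List.length_dropLast]; omega),
        List.getElem?_eq_getElem (by omega), List.getElem_dropLast]
  constructor
  · intro hd j hj
    rw [← hget l j hj, ← hget m j (by omega), hd]
  · intro hj
    apply List.ext_getElem?
    intro i
    by_cases hi : i + 1 < l.length
    · rw [hget l i hi, hget m i (by omega)]
      exact hj i hi
    · rw [List.getElem?_eq_none (by simp [List.length_dropLast]; omega),
          List.getElem?_eq_none (by simp [List.length_dropLast]; omega)]

-- A, on equal-length strings, decides dropLast-equality of the two sorted lists
theorem decidePermutation2_char (astr bstr : String)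
    (h : astr.toList.length = bstr.toList.length) :
    decidePermutation2 astr bstr =
      decide ((PySem.List.sorted astr.toList (fun c => c) false).dropLast
        = (PySem.List.sorted bstr.toList (fun c => c) false).dropLast) := by
  unfold decidePermutation2
  rw [if_neg (by simp [PySem.Str.len_eq, h])]
  have hlen : (PySem.List.sorted astr.toList (fun c => c) false).length
      = (PySem.List.sorted bstr.toList (fun c => c) false).length := by
    simp [PySem.List.length_sorted, h]
  by_cases hd : (PySem.List.sorted astr.toList (fun c => c) false).dropLast
      = (PySem.List.sorted bstr.toList (fun c => c) false).dropLast
  · rw [decide_eq_true hd]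
    exact (pvALoop_true_iff _ _ _ 0 (by omega)).mpr (fun j _ hj =>
      ((dropLast_eq_iff _ _ hlen).mp hd) j hj)
  · rw [decide_eq_false hd]
    cases hb : pvALoop (PySem.List.sorted astr.toList (fun c => c) false)
        (PySem.List.sorted bstr.toList (fun c => c) false) true 0
        (PySem.List.sorted astr.toList (fun c => c) false).length
    · rfl
    · exact absurd ((dropLast_eq_iff _ _ hlen).mpr
        (fun j hj => ((pvALoop_true_iff _ _ _ 0 (by omega)).mp hb) j (Nat.zero_le _) hj)) hd

-- B's drain loop succeeds iff the remaining string's counts fit under the dictionary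
theorem pvBLoop_true_iff (l : List Char) (d : PySem.Dict Char Int)
    (hd : ∀ c, 0 ≤ d.getD c 0) :
    pvBLoop d l = true ↔ ∀ c ∈ l, (l.count c : Int) ≤ d.getD c 0 := by
  induction l generalizing d with
  | nil => simp [pvBLoop]
  | cons c rest ih =>
    rw [pvBLoop]
    by_cases h0 : d.getD c 0 = 0
    · rw [if_pos (by simp [h0])]
      simp only [Bool.false_eq_true, false_iff]
      intro hall
      have := hall c (by simp)
      rw [List.count_cons_self, h0] at this
      push_cast at this
      omega
    · rw [if_neg (by simp [h0])]
      have h1 : 1 ≤ d.getD c 0 := lt_of_le_of_ne (hd c) (Ne.symm h0)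
      have hd' : ∀ x, 0 ≤ (d.insert c (d.getD c 0 - 1)).getD x 0 := by
        intro x
        rw [PySem.Dict.getD_insert]
        by_cases hx : x = c
        · rw [if_pos hx]; omega
        · rw [if_neg hx]; exact hd x
      rw [ih _ hd']
      constructor
      · intro hall x hx
        by_cases hxc : x = c
        · subst hxc
          rw [List.count_cons_self]
          by_cases hm : x ∈ rest
          · have := hall x hm
            rw [PySem.Dict.getD_insert, if_pos rfl] at this
            push_cast
            omega
          · rw [List.count_eq_zero.mpr hm]
            push_cast
            omega
        · have hm : x ∈ rest := by
            rcases List.mem_cons.mp hx with h | h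
            · exact absurd h hxc
            · exact h
          have := hall x hm
          rw [PySem.Dict.getD_insert, if_neg hxc] at this
          simpa [List.count_cons, hxc, Ne.symm hxc] using this
      · intro hall x hx
        rw [PySem.Dict.getD_insert]
        by_cases hxc : x = c
        · subst hxc
          have := hall x (by simp)
          rw [List.count_cons_self] at this
          rw [if_pos rfl]
          push_cast at this ⊢
          omega
        · rw [if_neg hxc]
          have := hall x (List.mem_cons_of_mem c hx)
          simpa [List.count_cons, hxc, Ne.symm hxc] using this

-- B, on equal-length strings, decides equality of the two sorted lists (i.e. permutation)
theorem decidePermutation2_alt_char (astr bstr : String)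
    (h : astr.toList.length = bstr.toList.length) :
    decidePermutation2_alt astr bstr
      = decide (PySem.List.sorted astr.toList (fun c => c) false
          = PySem.List.sorted bstr.toList (fun c => c) false) := by
  unfold decidePermutation2_alt
  rw [if_neg (by simp [PySem.Str.len_eq, h])]
  simp only [PySem.Dict.foldl_insert_getD_add_one_eq_counter]
  have hnn : ∀ c, 0 ≤ (PySem.Dict.counter astr.toList).getD c 0 := by
    intro c
    rw [PySem.Dict.getD_counter]
    simp
  rw [Bool.eq_iff_iff, pvBLoop_true_iff _ _ hnn, decide_eq_true_eq,
      PySem.List.sorted_id_eq_sorted_id_iff_perm]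
  constructor
  · intro hall
    have hsub : bstr.toList.Subperm astr.toList := by
      rw [List.subperm_ext_iff]
      intro x hx
      have := hall x hx
      rw [PySem.Dict.getD_counter] at this
      exact_mod_cast this
    exact (hsub.perm_of_length_le (le_of_eq h)).symm
  · intro hperm c hc
    rw [PySem.Dict.getD_counter, hperm.count_eq]


-- a nonempty list of characters has a maximum
theorem pvMaxExists (l : List Char) (h : l ≠ []) : ∃ m, l.max? = some m := by
  cases hc : l.max? with
  | none => exact absurd (List.max?_eq_none_iff.mp hc) h
  | some m => exact ⟨m, rfl⟩

-- a sorted list is the sorted rest with the maximum appended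
theorem sorted_eq_erase_max_concat (l : List Char) (m : Char) (hm : m ∈ l)
    (hmax : ∀ x ∈ l, x ≤ m) :
    PySem.List.sorted l (fun c => c) false
      = PySem.List.sorted (l.erase m) (fun c => c) false ++ [m] := by
  apply PySem.List.sorted_id_eq_of_perm_of_pairwise
  · exact (((PySem.List.sorted_perm _ _ _).append_right [m]).trans
      (List.perm_append_singleton m _)).trans (List.perm_cons_erase hm).symm
  · rw [List.pairwise_append]
    refine ⟨PySem.List.sorted_pairwise _ _, List.pairwise_singleton _ _, ?_⟩
    intro x hx y hy
    rw [List.mem_singleton] at hy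
    subst hy
    exact hmax x (List.mem_of_mem_erase ((PySem.List.mem_sorted _ _ _ _).mp hx))

-- equality of erase-counts on the members extends to all characters
theorem count_erase_all (la lb : List Char) (ma mb : Char)
    (h : ∀ c ∈ la ++ lb, (la.erase ma).count c = (lb.erase mb).count c) :
    ∀ c, (la.erase ma).count c = (lb.erase mb).count c := by
  intro c
  by_cases hc : c ∈ la ++ lb
  · exact h c hc
  · rw [List.count_eq_zero.mpr
        (fun hm => hc (List.mem_append_left _ (List.mem_of_mem_erase hm))),
      List.count_eq_zero.mpr
        (fun hm => hc (List.mem_append_right _ (List.mem_of_mem_erase hm)))]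

-- ===== VERDICT (by name: the statements are the Claim_ definitions above) =====
theorem decidePermutation2_spec : Claim_unchanged_decidePermutation2 := by
  intro astr bstr _ hD
  show decidePermutation2 astr bstr = decidePermutation2_alt astr bstr
  by_cases h : astr.toList.length = bstr.toList.length
  · by_cases hemp : astr.toList = []
    · have hbemp : bstr.toList = [] :=
        List.length_eq_zero_iff.mp (by rw [← h, hemp]; rfl)
      rw [decidePermutation2_char astr bstr h, decidePermutation2_alt_char astr bstr h,
          hemp, hbemp]
      decide
    · have hbne : bstr.toList ≠ [] := fun hb =>
        hemp (List.length_eq_zero_iff.mp (by rw [h, hb]; rfl))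
      obtain ⟨ma, hma⟩ := pvMaxExists _ hemp
      obtain ⟨mb, hmb⟩ := pvMaxExists _ hbne
      have hmala : ma ∈ astr.toList := List.max?_mem hma
      have hmblb : mb ∈ bstr.toList := List.max?_mem hmb
      have hmaxa : ∀ x ∈ astr.toList, x ≤ ma :=
        fun x hx => (List.max?_le_iff hma).mp le_rfl x hx
      have hmaxb : ∀ x ∈ bstr.toList, x ≤ mb :=
        fun x hx => (List.max?_le_iff hmb).mp le_rfl x hx
      rw [decidePermutation2_char astr bstr h, decidePermutation2_alt_char astr bstr h,
          sorted_eq_erase_max_concat astr.toList ma hmala hmaxa,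
          sorted_eq_erase_max_concat bstr.toList mb hmblb hmaxb,
          List.dropLast_concat, List.dropLast_concat]
      by_cases hmm : ma = mb
      · subst hmm
        rw [Bool.eq_iff_iff, decide_eq_true_iff, decide_eq_true_iff]
        exact (List.append_left_inj [ma]).symm
      · have hcnt : ¬ ∀ c ∈ astr.toList ++ bstr.toList,
            (astr.toList.erase ((astr.toList.max?).getD 'a')).count c
              = (bstr.toList.erase ((bstr.toList.max?).getD 'a')).count c := by
          intro hc
          exact hD ⟨h, hemp, by rw [hma, hmb]; simp [hmm], hc⟩
        simp only [hma, hmb, Option.getD_some] at hcnt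
        have hlen : (PySem.List.sorted (astr.toList.erase ma) (fun c => c) false).length
            = (PySem.List.sorted (bstr.toList.erase mb) (fun c => c) false).length := by
          simp [PySem.List.length_sorted, List.length_erase_of_mem hmala,
            List.length_erase_of_mem hmblb, h]
        have hA : ¬ (PySem.List.sorted (astr.toList.erase ma) (fun c => c) false
            = PySem.List.sorted (bstr.toList.erase mb) (fun c => c) false) := by
          intro he
          exact hcnt (fun c _ =>
            ((PySem.List.sorted_id_eq_sorted_id_iff_perm _ _).mp he).count_eq c)
        have hB : ¬ (PySem.List.sorted (astr.toList.erase ma) (fun c => c) false ++ [ma]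
            = PySem.List.sorted (bstr.toList.erase mb) (fun c => c) false ++ [mb]) := by
          intro he
          have := (List.append_inj he hlen).2
          injection this with h1 _
          exact hmm h1
        rw [decide_eq_false hA, decide_eq_false hB]
  · unfold decidePermutation2 decidePermutation2_alt
    have hlen : ¬ PySem.Str.len astr = PySem.Str.len bstr := by
      simp only [PySem.Str.len_eq]
      intro hc
      exact h (by exact_mod_cast hc)
    rw [if_pos hlen, if_pos hlen]

theorem decidePermutation2_changed : Claim_changed_decidePermutation2 := by
  unfold Claim_changed_decidePermutation2
  refine ⟨by decide, ?_, ?_, by decide, by decide⟩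
  · show D_decidePermutation2 "ab" "ac"
    unfold D_decidePermutation2
    refine ⟨by decide, by decide, by decide, ?_⟩
    rw [show "ab".toList = ['a', 'b'] from rfl, show "ac".toList = ['a', 'c'] from rfl]
    intro c hc
    fin_cases hc <;> decide
  · show decidePermutation2 "ab" "ac" = true
    rw [decidePermutation2_char "ab" "ac" (by decide)]
    decide

theorem decidePermutation2_tight : Claim_exact_decidePermutation2 := by
  intro astr bstr _ hD
  obtain ⟨h, hemp, hmm, hcnt⟩ := hD
  have hbne : bstr.toList ≠ [] := fun hb =>
    hemp (List.length_eq_zero_iff.mp (by rw [h, hb]; rfl))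
  obtain ⟨ma, hma⟩ := pvMaxExists _ hemp
  obtain ⟨mb, hmb⟩ := pvMaxExists _ hbne
  simp only [hma, hmb, Option.getD_some] at hcnt
  rw [hma, hmb, ne_eq, Option.some_inj] at hmm
  have hmala : ma ∈ astr.toList := List.max?_mem hma
  have hmblb : mb ∈ bstr.toList := List.max?_mem hmb
  have hmaxa : ∀ x ∈ astr.toList, x ≤ ma :=
    fun x hx => (List.max?_le_iff hma).mp le_rfl x hx
  have hmaxb : ∀ x ∈ bstr.toList, x ≤ mb :=
    fun x hx => (List.max?_le_iff hmb).mp le_rfl x hx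
  rw [decidePermutation2_char astr bstr h, decidePermutation2_alt_char astr bstr h,
      sorted_eq_erase_max_concat astr.toList ma hmala hmaxa,
      sorted_eq_erase_max_concat bstr.toList mb hmblb hmaxb,
      List.dropLast_concat, List.dropLast_concat]
  have hperm : (astr.toList.erase ma).Perm (bstr.toList.erase mb) :=
    List.perm_iff_count.mpr (count_erase_all _ _ _ _ hcnt)
  have hA : PySem.List.sorted (astr.toList.erase ma) (fun c => c) false
      = PySem.List.sorted (bstr.toList.erase mb) (fun c => c) false :=
    (PySem.List.sorted_id_eq_sorted_id_iff_perm _ _).mpr hperm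
  have hB : ¬ (PySem.List.sorted (astr.toList.erase ma) (fun c => c) false ++ [ma]
      = PySem.List.sorted (bstr.toList.erase mb) (fun c => c) false ++ [mb]) := by
    intro he
    have hlen : (PySem.List.sorted (astr.toList.erase ma) (fun c => c) false).length
        = (PySem.List.sorted (bstr.toList.erase mb) (fun c => c) false).length := by
      simp [PySem.List.length_sorted, List.length_erase_of_mem hmala,
        List.length_erase_of_mem hmblb, h]
    have := (List.append_inj he hlen).2
    injection this with h1 _
    exact hmm h1
  rw [decide_eq_true hA, decide_eq_false hB]
  decide
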